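-- pv_equiv track=rewrite | github.com/pypi-data/pypi-mirror-268 | packages/QDsim/qdsim-1.0.1.tar.gz/qdsim-1.0.1/qdsim/_QuantumDotDevice.py | get_lattice
-- ===== SOURCE A (Python) =====
-- def get_lattice(n):
--
--     """
--     It generates a square lattice of size N x N. N must be a positive integer, strictly greater than 1.
--
--     Args:
--         n (int): size of the lattice
--
--     Returns:
--         list: list of tuples (i, j)
--
--     Note:
--         Return a list of tuples (i, j) where i, j are matrix indices in the order so that
--         [(0, N-1), (0, N-2), (1, N-1), (0, N-3), (1, N-2), (2, N-1), ..., (N-2, N-1), (0, 0), (1, 1), ..., (N-1, N-1),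
--          ..., (N-1, 0)]. i.e., the indices are ordered as if the matrix was flattened and the elements were read on the
--         diagonals from the top right to the bottom left.
--
--         For example, if N = 3, the function returns
--         [(0, 2), (0, 1), (1, 2), (0, 0), (1, 1), (2, 2), (1, 0), (2, 1), (2, 0)]
--
--     """
--
--     lattice = []
--     tail = []
--     for d in range(1, n):
--         temp = []
--         for i in range(d):
--             lattice.append((i, n - d + i))
--             temp.append((n - d + i, i))
--         tail = temp + tail
--     for i in range(n):
--         lattice.append((i, i))
--     lattice.extend(tail)
--
--     return lattice
-- ===== SOURCE B (Python) =====
-- def get_lattice(n):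
--     """Single ordered sweep over diagonal offsets k = j - i, from the top-right
--     diagonal (k = n-1) down to the bottom-left (k = -(n-1)); no tail buffer."""
--     out = []
--     for k in range(n - 1, -n, -1):
--         for i in range(max(0, -k), min(n, n - k)):
--             out.append((i, i + k))
--     return out
-- ===== Notes on version B (the rewrite author's own statement) =====
-- stated objective: simpler
-- what changed: B replaces A's two growing buffers (forward-appended lattice plus a tail built by repeated list prepending) with a single ordered sweep over the diagonal offset k = j - i from n-1 down to -(n-1), emitting each diagonal directly in its final position.
import Mathlib
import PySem

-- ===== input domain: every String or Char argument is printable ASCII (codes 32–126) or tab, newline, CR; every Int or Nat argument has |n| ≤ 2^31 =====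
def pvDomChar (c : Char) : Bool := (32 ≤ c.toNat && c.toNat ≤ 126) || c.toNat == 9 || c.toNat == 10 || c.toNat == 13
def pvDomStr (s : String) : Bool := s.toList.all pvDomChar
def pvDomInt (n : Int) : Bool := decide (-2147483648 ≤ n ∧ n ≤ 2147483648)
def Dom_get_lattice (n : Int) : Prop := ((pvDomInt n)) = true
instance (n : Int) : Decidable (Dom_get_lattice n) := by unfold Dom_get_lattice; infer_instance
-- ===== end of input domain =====

-- B replaces A's two buffers (appended head + prepended tail) by one ordered sweep over
-- the diagonal offset k = j - i from n-1 down to -(n-1) (objective: simpler, same cost).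

-- ===== PORT A =====
def get_lattice (n : Int) : List (Int × Int) :=
  -- lattice = []; tail = []; for d in range(1, n): temp = []; inner loop appends to both
  let st :=
    (PySem.List.pyRange 1 n 1).foldl
      (fun (st : List (Int × Int) × List (Int × Int)) d =>
        let inner :=
          (PySem.List.pyRange 0 d 1).foldl
            (fun (p : List (Int × Int) × List (Int × Int)) i =>
              (p.1 ++ [(i, n - d + i)], p.2 ++ [(n - d + i, i)]))
            (st.1, ([] : List (Int × Int)))
        (inner.1, inner.2 ++ st.2))    -- tail = temp + tail
      ([], [])
  let lattice :=
    (PySem.List.pyRange 0 n 1).foldl (fun lat i => lat ++ [(i, i)]) st.1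
  lattice ++ st.2                      -- lattice.extend(tail)

-- ===== PORT B =====
def get_lattice_alt (n : Int) : List (Int × Int) :=
  (PySem.List.pyRange (n - 1) (-n) (-1)).foldl
    (fun out k =>
      (PySem.List.pyRange (max 0 (-k)) (min n (n - k)) 1).foldl
        (fun acc i => acc ++ [(i, i + k)]) out)
    []

-- ===== PRECONDITION & SPEC =====
def Spec_get_lattice (n : Int) (out : List (Int × Int)) : Prop := out = get_lattice_alt n
instance (n : Int) (out : List (Int × Int)) : Decidable (Spec_get_lattice n out) := by unfold Spec_get_lattice; infer_instance

-- ===== CLAIM (what is proved, stated in full; the proofs are below) =====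
def Claim_equal_get_lattice : Prop := ∀ (n : Int), Dom_get_lattice n → Spec_get_lattice n (get_lattice n)

-- ===== LEMMAS AND PROOFS =====

-- the inner pair-accumulating loop of A, in closed form
theorem pvPairFold {α : Type} (l : List Int) (f g : Int → α) (a b : List α) :
    l.foldl (fun (p : List α × List α) i => (p.1 ++ [f i], p.2 ++ [g i])) (a, b)
      = (a ++ l.map f, b ++ l.map g) := by
  induction l generalizing a b with
  | nil => simp
  | cons x xs ih => simp [ih]

-- the outer loop of A with the inner loop already in closed form
theorem pvOuterFold' (n : Int) (l : List Int) (L T : List (Int × Int)) :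
    l.foldl
      (fun (st : List (Int × Int) × List (Int × Int)) d =>
        (st.1 ++ (PySem.List.pyRange 0 d).map (fun i => (i, n - d + i)),
         (PySem.List.pyRange 0 d).map (fun i => (n - d + i, i)) ++ st.2))
      (L, T)
    = (L ++ l.flatMap (fun d => (PySem.List.pyRange 0 d).map (fun i => (i, n - d + i))),
       l.reverse.flatMap (fun d => (PySem.List.pyRange 0 d).map (fun i => (n - d + i, i))) ++ T) := by
  induction l generalizing L T with
  | nil => simp
  | cons x xs ih => simp [ih, List.append_assoc]

-- the outer loop of A, as written (temp buffer and all), in closed form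
theorem pvOuterFold (n : Int) (l : List Int) (L T : List (Int × Int)) :
    l.foldl
      (fun (st : List (Int × Int) × List (Int × Int)) d =>
        let inner :=
          (PySem.List.pyRange 0 d 1).foldl
            (fun (p : List (Int × Int) × List (Int × Int)) i =>
              (p.1 ++ [(i, n - d + i)], p.2 ++ [(n - d + i, i)]))
            (st.1, ([] : List (Int × Int)))
        (inner.1, inner.2 ++ st.2))
      (L, T)
    = (L ++ l.flatMap (fun d => (PySem.List.pyRange 0 d).map (fun i => (i, n - d + i))),
       l.reverse.flatMap (fun d => (PySem.List.pyRange 0 d).map (fun i => (n - d + i, i))) ++ T) := by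
  have hf : (fun (st : List (Int × Int) × List (Int × Int)) (d : Int) =>
        let inner :=
          (PySem.List.pyRange 0 d 1).foldl
            (fun (p : List (Int × Int) × List (Int × Int)) i =>
              (p.1 ++ [(i, n - d + i)], p.2 ++ [(n - d + i, i)]))
            (st.1, ([] : List (Int × Int)))
        (inner.1, inner.2 ++ st.2))
      = (fun (st : List (Int × Int) × List (Int × Int)) (d : Int) =>
        (st.1 ++ (PySem.List.pyRange 0 d).map (fun i => (i, n - d + i)),
         (PySem.List.pyRange 0 d).map (fun i => (n - d + i, i)) ++ st.2)) := by
    funext st d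
    simp [pvPairFold]
  rw [hf, pvOuterFold']

-- A, characterised: the upper diagonals, the main diagonal, then the lower diagonals in reverse order
theorem pvA_eq (n : Int) :
    get_lattice n
      = (PySem.List.pyRange 1 n).flatMap (fun d => (PySem.List.pyRange 0 d).map (fun i => (i, n - d + i)))
        ++ (PySem.List.pyRange 0 n).map (fun i => (i, i))
        ++ (PySem.List.pyRange 1 n).reverse.flatMap (fun d => (PySem.List.pyRange 0 d).map (fun i => (n - d + i, i))) := by
  unfold get_lattice
  rw [pvOuterFold]
  simp only [PySem.List.foldl_append_singleton_eq_map, List.nil_append, List.append_nil,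
    List.append_assoc]

-- B, characterised: one flatMap over the descending offsets
theorem pvB_eq (n : Int) :
    get_lattice_alt n
      = (PySem.List.pyRange (n - 1) (-n) (-1)).flatMap
          (fun k => (PySem.List.pyRange (max 0 (-k)) (min n (n - k))).map (fun i => (i, i + k))) := by
  unfold get_lattice_alt
  have hf : (fun (out : List (Int × Int)) (k : Int) =>
        (PySem.List.pyRange (max 0 (-k)) (min n (n - k)) 1).foldl
          (fun acc i => acc ++ [(i, i + k)]) out)
      = (fun (out : List (Int × Int)) (k : Int) =>
        out ++ (PySem.List.pyRange (max 0 (-k)) (min n (n - k))).map (fun i => (i, i + k))) := by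
    funext out k
    rw [PySem.List.foldl_append_singleton_eq_map]
  rw [hf, PySem.List.foldl_append_eq_flatMap]
  simp

-- the list [1, ..., n-1] reversed, written over List.range
theorem pvRev1 (n : Int) :
    (PySem.List.pyRange 1 n).reverse = (List.range (n-1).toNat).map (fun (k : Nat) => n - 1 - (k : Int)) := by
  have hb := PySem.List.pyRange_neg_one_eq_reverse (n-1) 0
  rw [PySem.List.pyRange_neg_one] at hb
  have h1 : (0:Int) + 1 = 1 := by norm_num
  have h2 : n - 1 + 1 = n := by ring
  have h3 : n - 1 - 0 = n - 1 := by ring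
  rw [h1, h2, h3] at hb
  exact hb.symm

-- the list [-n+1, ..., -1] reversed, written over List.range
theorem pvRev2 (n : Int) :
    (PySem.List.pyRange (-n+1) 0).reverse = (List.range (n-1).toNat).map (fun (k : Nat) => -1 - (k : Int)) := by
  have hb := PySem.List.pyRange_neg_one_eq_reverse (-1) (-n)
  rw [PySem.List.pyRange_neg_one] at hb
  have h1 : (-1:Int) + 1 = 0 := by norm_num
  have h2 : (-1:Int) - -n = n - 1 := by ring
  rw [h1, h2] at hb
  exact hb.symm

theorem get_lattice_eq_alt (n : Int) : get_lattice n = get_lattice_alt n := by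
  rw [pvA_eq, pvB_eq]
  by_cases hn : n ≤ 0
  · rw [PySem.List.pyRange_one_eq_nil (show n ≤ (1:Int) by omega),
        PySem.List.pyRange_one_eq_nil (show n ≤ (0:Int) from hn),
        PySem.List.pyRange_neg_one_eq_nil (show n - 1 ≤ -n by omega)]
    simp
  · have h2 : PySem.List.pyRange (n-1) (-n) (-1) = (PySem.List.pyRange (-n+1) n).reverse := by
      have hx : n - 1 + 1 = n := by ring
      rw [PySem.List.pyRange_neg_one_eq_reverse, hx]
    have hsplit : PySem.List.pyRange (-n+1) n
        = PySem.List.pyRange (-n+1) 0 ++ (PySem.List.pyRange 0 1 ++ PySem.List.pyRange 1 n) := by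
      rw [PySem.List.pyRange_one_append (-n+1) 0 n (by omega) (by omega),
          PySem.List.pyRange_one_append 0 1 n (by omega) (by omega)]
    have h01 : PySem.List.pyRange 0 1 = [0] := by decide
    rw [h2, hsplit, h01]
    simp only [List.reverse_append, List.reverse_cons, List.reverse_nil, List.nil_append,
      List.flatMap_append, List.flatMap_cons, List.flatMap_nil, List.append_nil]
    have e2 : (PySem.List.pyRange (max 0 (-0)) (min n (n - 0))).map (fun i => (i, i + (0:Int)))
        = (PySem.List.pyRange 0 n).map (fun i => (i, i)) := by
      norm_num
    have e1 : ((PySem.List.pyRange 1 n).reverse).flatMap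
          (fun k => (PySem.List.pyRange (max 0 (-k)) (min n (n - k))).map (fun i => (i, i + k)))
        = (PySem.List.pyRange 1 n).flatMap
          (fun d => (PySem.List.pyRange 0 d).map (fun i => (i, n - d + i))) := by
      rw [pvRev1, PySem.List.pyRange_one 1 n]
      rw [List.flatMap_map, List.flatMap_map]
      apply List.flatMap_congr
      intro k hk
      simp only [List.mem_range] at hk
      have hk' : (k : Int) < n - 1 := by omega
      rw [max_eq_left (by omega : -(n - 1 - (k:Int)) ≤ 0),
          min_eq_right (by omega : n - (n - 1 - (k:Int)) ≤ n)]
      rw [show n - (n - 1 - (k:Int)) = 1 + (k:Int) from by ring]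
      apply List.map_congr_left
      intro i _
      simp only [Prod.mk.injEq, true_and]
      ring
    have e3 : ((PySem.List.pyRange (-n+1) 0).reverse).flatMap
          (fun k => (PySem.List.pyRange (max 0 (-k)) (min n (n - k))).map (fun i => (i, i + k)))
        = ((PySem.List.pyRange 1 n).reverse).flatMap
          (fun d => (PySem.List.pyRange 0 d).map (fun i => (n - d + i, i))) := by
      rw [pvRev2, pvRev1]
      rw [List.flatMap_map, List.flatMap_map]
      apply List.flatMap_congr
      intro k hk
      simp only [List.mem_range] at hk
      have hk' : (k : Int) < n - 1 := by omega
      rw [max_eq_right (by omega : (0:Int) ≤ -(-1 - (k:Int))),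
          min_eq_left (by omega : n ≤ n - (-1 - (k:Int)))]
      rw [PySem.List.pyRange_one (-(-1 - (k:Int))) n, PySem.List.pyRange_one 0 (n - 1 - (k:Int))]
      rw [List.map_map, List.map_map]
      rw [show (n - -(-1 - (k:Int))).toNat = (n - 1 - (k:Int) - 0).toNat from by omega]
      apply List.map_congr_left
      intro m _
      simp only [Function.comp, Prod.mk.injEq]
      exact ⟨by ring, by ring⟩
    rw [e1, e2, e3]

-- ===== VERDICT (by name: the statement is the Claim_ definition above) =====
theorem get_lattice_spec : Claim_equal_get_lattice := by
  intro n _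
  unfold Spec_get_lattice
  exact get_lattice_eq_alt n
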